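-- pv_equiv track=rewrite | github.com/HyperONE27/EvoLadderBot | src/utils/country_organization.py | split_countries_alphabetically
-- ===== SOURCE A (Python) =====
-- from typing import Dict, List, Tuple
--
-- def split_countries_alphabetically(countries: List[dict], max_per_group: int = 25) -> List[Tuple[str, List[dict]]]:
--     """Split countries into alphabetical groups if there are too many"""
--     if len(countries) <= max_per_group:
--         return [("All", countries)]
--
--     # Group by first letter
--     letter_groups = {}
--     for country in countries:
--         first_letter = country['name'][0].upper()
--         if first_letter not in letter_groups:
--             letter_groups[first_letter] = []
--         letter_groups[first_letter].append(country)
--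
--     # Combine small groups to reach approximately max_per_group
--     result = []
--     current_group = []
--     current_label_parts = []
--
--     for letter in sorted(letter_groups.keys()):
--         if len(current_group) + len(letter_groups[letter]) <= max_per_group:
--             current_group.extend(letter_groups[letter])
--             current_label_parts.append(letter)
--         else:
--             if current_group:
--                 if len(current_label_parts) == 1:
--                     label = current_label_parts[0]
--                 else:
--                     label = f"{current_label_parts[0]}-{current_label_parts[-1]}"
--                 result.append((label, current_group))
--
--             current_group = letter_groups[letter]
--             current_label_parts = [letter]
--
--     # Add the last group
--     if current_group:
--         if len(current_label_parts) == 1: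
--             label = current_label_parts[0]
--         else:
--             label = f"{current_label_parts[0]}-{current_label_parts[-1]}"
--         result.append((label, current_group))
--
--     return result
-- ===== SOURCE B (Python) =====
-- from itertools import groupby
--
--
-- def split_countries_alphabetically(countries, max_per_group=25):
--     """Split countries into alphabetical groups if there are too many"""
--     if len(countries) <= max_per_group:
--         return [("All", countries)]
--
--     def key(c):
--         return c['name'][0].upper()
--
--     groups = [(k, list(g)) for k, g in groupby(sorted(countries, key=key), key=key)]
--
--     def chunks(gs):
--         # each output group is the maximal prefix of letter-groups whose total
--         # size fits max_per_group (always at least one letter-group)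
--         if not gs:
--             return []
--         n, total = 1, len(gs[0][1])
--         while n < len(gs) and total + len(gs[n][1]) <= max_per_group:
--             total += len(gs[n][1])
--             n += 1
--         head, rest = gs[:n], gs[n:]
--         label = head[0][0] if n == 1 else f"{head[0][0]}-{head[-1][0]}"
--         return [(label, [c for _, grp in head for c in grp])] + chunks(rest)
--
--     return chunks(groups)
-- ===== Notes on version B (the rewrite author's own statement) =====
-- stated objective: alternative
-- what changed: Instead of A's dict-of-lists bucketing plus a stateful accumulator loop with two flush sites and a label-parts list, B sorts the countries once, groups them with itertools.groupby, and recursively splits the group list into chunks, computing each output group in one shot as the maximal prefix of letter-groups that fits max_per_group and labelling it from the chunk's endpoints.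
import Mathlib
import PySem

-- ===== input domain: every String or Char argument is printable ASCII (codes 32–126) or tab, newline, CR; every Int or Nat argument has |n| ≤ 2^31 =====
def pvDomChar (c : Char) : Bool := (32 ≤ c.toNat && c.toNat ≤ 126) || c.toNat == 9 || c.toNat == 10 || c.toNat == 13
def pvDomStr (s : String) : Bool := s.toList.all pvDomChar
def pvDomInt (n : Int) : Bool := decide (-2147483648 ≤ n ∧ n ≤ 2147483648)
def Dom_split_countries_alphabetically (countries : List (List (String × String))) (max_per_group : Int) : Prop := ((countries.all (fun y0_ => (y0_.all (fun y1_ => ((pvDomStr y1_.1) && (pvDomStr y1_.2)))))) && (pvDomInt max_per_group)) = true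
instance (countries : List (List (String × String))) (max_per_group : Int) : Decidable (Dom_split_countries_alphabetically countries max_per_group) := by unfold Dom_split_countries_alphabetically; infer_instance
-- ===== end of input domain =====

-- B replaces A's dict bucketing + accumulator/flush loop by one stable sort + groupby and a
-- recursive split of the letter-group list into maximal fitting chunks (objective: alternative).

-- ===== PORT A =====
-- shared key helper: c['name'][0].upper(); the getD defaults are only reached where Python
-- raises KeyError/IndexError, which Pre_ excludes
def pvLetter (c : List (String × String)) : Char :=
  PySem.Chars.upperChar ((PySem.Str.pyGet? (((PySem.Dict.mk c).get? "name").getD "") 0).getD ' ')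

-- A's label: parts[0] if len(parts)==1 else f"{parts[0]}-{parts[-1]}"
def pvLabelA (parts : List Char) : String :=
  if parts.length == 1 then String.ofList [(PySem.List.pyGet? parts 0).getD ' ']
  else String.ofList [(PySem.List.pyGet? parts 0).getD ' ', '-', (PySem.List.pyGet? parts (-1)).getD ' ']

-- one iteration of A's "for letter in sorted(letter_groups.keys())" loop;
-- state = (result, current_group, current_label_parts)
def pvStepA (lg : PySem.Dict Char (List (List (String × String)))) (max_per_group : Int)
    (st : List (String × List (List (String × String))) × List (List (String × String)) × List Char)
    (letter : Char) :
    List (String × List (List (String × String))) × List (List (String × String)) × List Char :=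
  let bucket := lg.getD letter []
  if (st.2.1.length : Int) + (bucket.length : Int) ≤ max_per_group then
    (st.1, st.2.1 ++ bucket, st.2.2 ++ [letter])
  else
    ((if st.2.1.isEmpty then st.1 else st.1 ++ [(pvLabelA st.2.2, st.2.1)]), bucket, [letter])

-- A's trailing "# Add the last group" flush
def pvFinA (st : List (String × List (List (String × String))) × List (List (String × String)) × List Char) :
    List (String × List (List (String × String))) :=
  if st.2.1.isEmpty then st.1 else st.1 ++ [(pvLabelA st.2.2, st.2.1)]

def split_countries_alphabetically (countries : List (List (String × String))) (max_per_group : Int) : List (String × (List (List (String × String)))) :=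
  if (countries.length : Int) ≤ max_per_group then [("All", countries)]
  else
    -- letter_groups: "if first_letter not in d: d[k] = []; d[k].append(c)"  =  modify k [] (· ++ [c])
    let lg := countries.foldl (fun d c => d.modify (pvLetter c) [] (· ++ [c])) PySem.Dict.empty
    pvFinA ((PySem.List.sorted lg.keys (fun x => x) false).foldl (pvStepA lg max_per_group) ([], [], []))

-- ===== PORT B =====
-- itertools.groupby with the run lists materialised (B does list(g))
def pvGroupby {α : Type} (key : α → Char) : List α → List (Char × List α)
  | [] => []
  | x :: xs =>
    match pvGroupby key xs with
    | [] => [(key x, [x])]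
    | (k, g) :: rest => if key x = k then (k, x :: g) :: rest else (key x, [x]) :: (k, g) :: rest

-- B's while loop: how many further letter-groups are absorbed, given the running total
def pvSpan (max_per_group : Int) : Int → List (Char × List (List (String × String))) → Nat
  | _, [] => 0
  | total, g :: rest =>
    if total + (g.2.length : Int) ≤ max_per_group then 1 + pvSpan max_per_group (total + (g.2.length : Int)) rest
    else 0

-- B's recursive chunks(gs): emit the maximal fitting prefix as one labelled group, recurse on the rest
def pvChunks (max_per_group : Int) : List (Char × List (List (String × String))) → List (String × List (List (String × String)))
  | [] => []
  | g :: gs =>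
    let n : Nat := 1 + pvSpan max_per_group ((g.2.length : Int)) gs
    let head := (g :: gs).take n
    (if n == 1 then String.ofList [g.1]
     else String.ofList [g.1, '-', (((PySem.List.pyGet? head (-1)).map (·.1)).getD ' ')],
     head.flatMap (·.2)) :: pvChunks max_per_group ((g :: gs).drop n)
  termination_by l => l.length
  decreasing_by simp only [List.length_drop, List.length_cons]; omega

def split_countries_alphabetically_alt (countries : List (List (String × String))) (max_per_group : Int) : List (String × (List (List (String × String)))) :=
  if (countries.length : Int) ≤ max_per_group then [("All", countries)]
  else
    pvChunks max_per_group (pvGroupby pvLetter (PySem.List.sorted countries pvLetter false))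

-- ===== PRECONDITION & SPEC =====
-- Pre_ excludes exactly the inputs where A raises: when the list is longer than max_per_group,
-- every country dict must have a key 'name' with a nonempty value (else KeyError / IndexError).
def Pre_split_countries_alphabetically (countries : List (List (String × String))) (max_per_group : Int) : Prop :=
  (countries.length : Int) ≤ max_per_group ∨
    ∀ c ∈ countries, (((PySem.Dict.mk c).get? "name").getD "") ≠ ""
instance (countries : List (List (String × String))) (max_per_group : Int) : Decidable (Pre_split_countries_alphabetically countries max_per_group) := by unfold Pre_split_countries_alphabetically; infer_instance

def pvWitness_split_countries_alphabetically : (List (List (String × String))) × Int :=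
  ([[("name", "Austria")], [("name", "Belgium")], [("name", "Brazil")]], 1)

def Spec_split_countries_alphabetically (countries : List (List (String × String))) (max_per_group : Int) (out : List (String × (List (List (String × String))))) : Prop := out = split_countries_alphabetically_alt countries max_per_group
instance (countries : List (List (String × String))) (max_per_group : Int) (out : List (String × (List (List (String × String))))) : Decidable (Spec_split_countries_alphabetically countries max_per_group out) := by unfold Spec_split_countries_alphabetically; infer_instance

-- ===== CLAIM (what is proved, stated in full; the proofs are below) =====
def Claim_equal_split_countries_alphabetically : Prop := ∀ (countries : List (List (String × String))) (max_per_group : Int), Dom_split_countries_alphabetically countries max_per_group → Pre_split_countries_alphabetically countries max_per_group → Spec_split_countries_alphabetically countries max_per_group (split_countries_alphabetically countries max_per_group)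

-- ===== LEMMAS AND PROOFS =====

-- the per-letter bucket: the in-order sublist of countries with first letter L
def pvBk (countries : List (List (String × String))) (L : Char) : List (List (String × String)) :=
  countries.filter (fun c => pvLetter c == L)

-- A's step with the dict lookup replaced by the (letter, bucket) pair
def pvStepP (max_per_group : Int)
    (st : List (String × List (List (String × String))) × List (List (String × String)) × List Char)
    (p : Char × List (List (String × String))) :
    List (String × List (List (String × String))) × List (List (String × String)) × List Char :=
  if (st.2.1.length : Int) + (p.2.length : Int) ≤ max_per_group then
    (st.1, st.2.1 ++ p.2, st.2.2 ++ [p.1])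
  else
    ((if st.2.1.isEmpty then st.1 else st.1 ++ [(pvLabelA st.2.2, st.2.1)]), p.2, [p.1])

-- A's dict: every bucket is the in-order filter of the input
theorem pv_getD_lg (countries : List (List (String × String))) (L : Char) :
    (countries.foldl (fun d c => d.modify (pvLetter c) [] (· ++ [c])) PySem.Dict.empty).getD L []
      = pvBk countries L := by
  have h := PySem.Dict.getD_foldl_modify_append
      (countries.map (fun c => (pvLetter c, c))) (PySem.Dict.empty) L
  rw [List.foldl_map] at h
  simp only [h, pvBk, PySem.Dict.getD_empty, List.nil_append, List.filter_map, List.map_map]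
  simp [Function.comp_def]

-- A's dict keys are the distinct letters in first-occurrence order
theorem pv_keys_lg (countries : List (List (String × String))) :
    (countries.foldl (fun d c => d.modify (pvLetter c) [] (· ++ [c])) PySem.Dict.empty).keys
      = PySem.Set.ofList (countries.map pvLetter) := by
  have h := PySem.Dict.keys_foldl_modify_key countries pvLetter ([] : List (List (String × String)))
      (fun _ c => (· ++ [c])) PySem.Dict.empty
  simpa [PySem.Set.update_nil_left] using h

theorem pv_insertBy_skip {α : Type} (before : α → α → Bool) (x : α) :
    ∀ (b rest : List α), (∀ a ∈ b, before x a = false) →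
      PySem.List.insertBy before x (b ++ rest) = b ++ PySem.List.insertBy before x rest := by
  intro b
  induction b with
  | nil => simp
  | cons a b ih =>
    intro rest h
    simp only [List.cons_append, PySem.List.insertBy, h a (by simp)]
    simp [ih rest (fun a' ha' => h a' (by simp [ha']))]

theorem pv_insertBy_front {α : Type} (before : α → α → Bool) (x : α) :
    ∀ (l : List α), (∀ a ∈ l, before x a = true) →
      PySem.List.insertBy before x l = x :: l := by
  intro l h
  cases l with
  | nil => simp [PySem.List.insertBy]
  | cons a l => simp [PySem.List.insertBy, h a (by simp)]

theorem pv_insertBy_perm {α : Type} (before : α → α → Bool) (x : α) :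
    ∀ (l : List α), (PySem.List.insertBy before x l).Perm (x :: l) := by
  intro l
  induction l with
  | nil => simp [PySem.List.insertBy]
  | cons a l ih =>
    by_cases h : before x a = true
    · simp [PySem.List.insertBy, h]
    · simp only [PySem.List.insertBy, if_neg h]
      exact (ih.cons a).trans (List.Perm.swap x a l)

theorem pv_insertBy_lt_pairwise (k : Char) :
    ∀ (S : List Char), S.Pairwise (· < ·) → k ∉ S →
      (PySem.List.insertBy (fun a b => decide (a < b)) k S).Pairwise (· < ·) := by
  intro S
  induction S with
  | nil => simp [PySem.List.insertBy]
  | cons L S ih =>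
    intro hp hk
    by_cases h : k < L
    · simp only [PySem.List.insertBy, decide_eq_true_eq, if_pos h]
      refine List.Pairwise.cons ?_ hp
      intro b hb
      rcases List.mem_cons.mp hb with rfl | hb
      · exact h
      · exact h.trans (List.rel_of_pairwise_cons hp hb)
    · simp only [PySem.List.insertBy, decide_eq_true_eq, if_neg h]
      have hkL : L < k := by
        rcases lt_trichotomy k L with h1 | h1 | h1
        · exact absurd h1 h
        · exact absurd h1 (by intro e; exact hk (by simp [e]))
        · exact h1
      refine List.Pairwise.cons ?_ (ih (List.Pairwise.of_cons hp) (fun h' => hk (by simp [h'])))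
      intro b hb
      have := (pv_insertBy_perm _ k S).mem_iff.mp hb
      rcases List.mem_cons.mp this with rfl | hb'
      · exact hkL
      · exact List.rel_of_pairwise_cons hp hb'

theorem pv_insFlat {α : Type} (key : α → Char) (x : α) :
    ∀ (S : List Char) (blocks : Char → List α),
      S.Pairwise (· < ·) →
      (∀ L ∈ S, ∀ a ∈ blocks L, key a = L) →
      (key x ∉ S → blocks (key x) = []) →
      PySem.List.insertBy (fun a b => decide (key a < key b)) x (S.flatMap blocks)
        = (if key x ∈ S then S
           else PySem.List.insertBy (fun a b => decide (a < b)) (key x) S).flatMap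
            (fun L => if L = key x then blocks L ++ [x] else blocks L) := by
  intro S
  induction S with
  | nil =>
    intro blocks _ _ h4
    simp [PySem.List.insertBy, h4 (by simp)]
  | cons L S ih =>
    intro blocks hp hk h4
    have hS : ∀ L' ∈ S, L < L' := fun L' hL' => List.rel_of_pairwise_cons hp hL'
    rcases lt_trichotomy (key x) L with hlt | heq | hgt
    · have hnot : key x ∉ L :: S := by
        intro hmem
        rcases List.mem_cons.mp hmem with rfl | hmem
        · exact absurd hlt (lt_irrefl _)
        · exact absurd (hS _ hmem) (fun h => absurd (h.trans hlt) (lt_irrefl _))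
      have hfront : PySem.List.insertBy (fun a b => decide (key a < key b)) x ((L :: S).flatMap blocks)
          = x :: (L :: S).flatMap blocks := by
        apply pv_insertBy_front
        intro a ha
        simp only [decide_eq_true_eq]
        rcases List.mem_flatMap.mp ha with ⟨L', hL', ha'⟩
        rw [hk L' hL' a ha']
        rcases List.mem_cons.mp hL' with rfl | hL'
        · exact hlt
        · exact hlt.trans (hS _ hL')
      have hins : PySem.List.insertBy (fun a b => decide (a < b)) (key x) (L :: S)
          = key x :: L :: S := by
        simp [PySem.List.insertBy, hlt]
      have hcongr : List.flatMap (fun L' => if L' = key x then blocks L' ++ [x] else blocks L') (L :: S)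
          = List.flatMap blocks (L :: S) := by
        apply List.flatMap_congr
        intro L' hL'
        have hne : L' ≠ key x := fun e => hnot (e ▸ hL')
        simp [hne]
      rw [hfront, if_neg hnot, hins]
      conv_rhs => rw [List.flatMap_cons]
      rw [hcongr]
      simp [h4 hnot]
    · subst heq
      have hskip : ∀ a ∈ blocks (key x), (fun a b => decide (key a < key b)) x a = false := by
        intro a ha
        show decide (key x < key a) = false
        rw [show key a = key x from hk (key x) (by simp) a ha]
        simp
      have hfront : ∀ a ∈ S.flatMap blocks, (fun a b => decide (key a < key b)) x a = true := by
        intro a ha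
        rcases List.mem_flatMap.mp ha with ⟨L', hL', ha'⟩
        show decide (key x < key a) = true
        rw [show key a = L' from hk L' (by simp [hL']) a ha']
        simpa using hS _ hL'
      have hcongr : List.flatMap (fun L' => if L' = key x then blocks L' ++ [x] else blocks L') S
          = List.flatMap blocks S := by
        apply List.flatMap_congr
        intro L' hL'
        have hne : L' ≠ key x := fun e => absurd (hS _ hL') (e ▸ fun h => absurd h (lt_irrefl _))
        simp [hne]
      rw [List.flatMap_cons, pv_insertBy_skip _ x (blocks (key x)) _ hskip,
          pv_insertBy_front _ x _ hfront, if_pos (by simp), List.flatMap_cons, if_pos rfl, hcongr]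
      simp
    · have hLne : L ≠ key x := fun e => absurd (e ▸ hgt) (lt_irrefl _)
      have hskip : ∀ a ∈ blocks L, (fun a b => decide (key a < key b)) x a = false := by
        intro a ha
        show decide (key x < key a) = false
        rw [show key a = L from hk L (by simp) a ha]
        simp only [decide_eq_false_iff_not]
        exact fun h => absurd (hgt.trans h) (lt_irrefl _)
      rw [List.flatMap_cons, pv_insertBy_skip _ x (blocks L) _ hskip,
          ih blocks (List.Pairwise.of_cons hp) (fun L' hL' => hk L' (by simp [hL'])) ?h4']
      case h4' =>
        intro hnotS
        apply h4
        intro hmem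
        rcases List.mem_cons.mp hmem with e | hmem
        · exact hLne e.symm
        · exact hnotS hmem
      by_cases hmem : key x ∈ S
      · rw [if_pos hmem, if_pos (by simp [hmem]), List.flatMap_cons, if_neg hLne]
      · have hnotcons : key x ∉ L :: S := by
          intro hm
          rcases List.mem_cons.mp hm with e | hm
          · exact hLne e.symm
          · exact hmem hm
        have hstep : PySem.List.insertBy (fun a b => decide (a < b)) (key x) (L :: S)
            = L :: PySem.List.insertBy (fun a b => decide (a < b)) (key x) S := by
          have hnlt : ¬ key x < L := fun h => absurd (hgt.trans h) (lt_irrefl L)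
          simp [PySem.List.insertBy, hnlt]
        rw [if_neg hmem, if_neg hnotcons, hstep, List.flatMap_cons, if_neg hLne]

theorem pv_sorted_key_flatMap {α : Type} (key : α → Char) (xs : List α) :
    PySem.List.sorted xs key false
      = (PySem.List.sorted (PySem.Set.ofList (xs.map key)) (fun x => x) false).flatMap
          (fun L => xs.filter (fun c => key c == L)) := by
  induction xs using List.reverseRecOn with
  | nil => rfl
  | append_singleton ys x ih =>
    have hstep : PySem.List.sorted (ys ++ [x]) key false
        = PySem.List.insertBy (fun a b => decide (key a < key b)) x (PySem.List.sorted ys key false) := by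
      rw [PySem.List.sorted_eq_foldl_insertBy (ys ++ [x]) key, List.foldl_append,
          ← PySem.List.sorted_eq_foldl_insertBy ys key]
      rfl
    have hSys := PySem.List.sorted_ofList_pairwise_lt (ys.map key)
    set Sys := PySem.List.sorted (PySem.Set.ofList (ys.map key)) (fun x => x) false with hSysdef
    have hmemS : ∀ L, L ∈ Sys ↔ L ∈ ys.map key := by
      intro L
      rw [hSysdef, PySem.List.mem_sorted, PySem.Set.mem_ofList]
    rw [hstep, ih, pv_insFlat key x Sys _ hSys ?hk ?h4]
    case hk =>
      intro L _ a ha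
      have := (List.mem_filter.mp ha).2
      exact eq_of_beq this
    case h4 =>
      intro hnot
      rw [List.filter_eq_nil_iff]
      intro c hc hbeq
      exact hnot ((hmemS _).mpr (by
        rw [← eq_of_beq hbeq]
        exact List.mem_map_of_mem hc))
    have hext : ∀ L, (if L = key x then ys.filter (fun c => key c == L) ++ [x]
                      else ys.filter (fun c => key c == L))
        = (ys ++ [x]).filter (fun c => key c == L) := by
      intro L
      rw [List.filter_append]
      by_cases h : L = key x
      · subst h; simp
      · have : (key x == L) = false := by
          simp only [beq_eq_false_iff_ne, ne_eq]
          exact fun e => h e.symm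
        simp [this, h]
    by_cases hmem : key x ∈ ys.map key
    · have h1 : PySem.Set.ofList ((ys ++ [x]).map key) = PySem.Set.ofList (ys.map key) := by
        rw [List.map_append, List.map_singleton, PySem.Set.ofList_append_singleton,
            PySem.Set.add_of_mem (by rw [PySem.Set.mem_ofList]; exact hmem)]
      rw [if_pos ((hmemS _).mpr hmem), h1]
      exact List.flatMap_congr (fun L _ => hext L)
    · have h1 : PySem.Set.ofList ((ys ++ [x]).map key) = PySem.Set.ofList (ys.map key) ++ [key x] := by
        rw [List.map_append, List.map_singleton, PySem.Set.ofList_append_singleton,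
            PySem.Set.add_of_not_mem (by rw [PySem.Set.mem_ofList]; exact hmem)]
      have hknot : key x ∉ Sys := fun h => hmem ((hmemS _).mp h)
      have h2 : PySem.List.sorted (PySem.Set.ofList ((ys ++ [x]).map key)) (fun x => x) false
          = PySem.List.insertBy (fun a b => decide (a < b)) (key x) Sys := by
        rw [h1]
        apply PySem.List.sorted_eq_of_perm_of_pairwise_lt
        · exact (pv_insertBy_perm _ _ _).trans
            (((PySem.List.sorted_perm _ _ _).cons (key x)).trans
              (List.perm_append_singleton _ _).symm)
        · exact pv_insertBy_lt_pairwise (key x) Sys hSys hknot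
      rw [if_neg hknot, h2]
      exact List.flatMap_congr (fun L _ => hext L)

theorem pv_groupby_block {α : Type} (key : α → Char) (L : Char) :
    ∀ (b : List α), b ≠ [] → (∀ a ∈ b, key a = L) →
      ∀ rest, (∀ p ∈ (pvGroupby key rest).head?, p.1 ≠ L) →
      pvGroupby key (b ++ rest) = (L, b) :: pvGroupby key rest := by
  intro b
  induction b with
  | nil => intro h; exact absurd rfl h
  | cons a b ihb =>
    intro _ hkey rest hhead
    cases b with
    | nil =>
      have hka : key a = L := hkey a (by simp)
      rcases hgs : pvGroupby key rest with _ | ⟨⟨k, g⟩, gs⟩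
      · simp [pvGroupby, hgs, hka]
      · have hk : k ≠ L := by
          have := hhead (k, g) (by simp [hgs])
          simpa using this
        simp only [List.singleton_append, pvGroupby, hgs]
        rw [if_neg (by rw [hka]; exact fun e => hk e.symm)]
        simp [hka]
    | cons a' b' =>
      have ih := ihb (by simp) (fun y hy => hkey y (by simp [List.mem_cons.mp hy])) rest hhead
      have hka : key a = L := hkey a (by simp)
      simp only [List.cons_append] at ih ⊢
      rw [show pvGroupby key (a :: (a' :: (b' ++ rest)))
            = match pvGroupby key (a' :: (b' ++ rest)) with
              | [] => [(key a, [a])]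
              | (k, g) :: rest' => if key a = k then (k, a :: g) :: rest'
                                   else (key a, [a]) :: (k, g) :: rest' from rfl, ih]
      simp [hka]

theorem pv_groupby_flatMap {α : Type} (key : α → Char) :
    ∀ (S : List Char) (blocks : Char → List α),
      S.Pairwise (· < ·) → (∀ L ∈ S, ∀ a ∈ blocks L, key a = L) →
      (∀ L ∈ S, blocks L ≠ []) →
      pvGroupby key (S.flatMap blocks) = S.map (fun L => (L, blocks L)) := by
  intro S
  induction S with
  | nil => intro blocks _ _ _; rfl
  | cons L S ih =>
    intro blocks hp hk hne
    have hS : ∀ L' ∈ S, L < L' := fun L' hL' => List.rel_of_pairwise_cons hp hL'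
    have ihS := ih blocks (List.Pairwise.of_cons hp)
      (fun L' hL' => hk L' (by simp [hL'])) (fun L' hL' => hne L' (by simp [hL']))
    rw [List.flatMap_cons,
        pv_groupby_block key L (blocks L) (hne L (by simp)) (hk L (by simp)) _ ?hhead, ihS,
        List.map_cons]
    case hhead =>
      intro p hp'
      rw [ihS] at hp'
      cases S with
      | nil => simp at hp'
      | cons L' S' =>
        simp only [List.map_cons, List.head?_cons, Option.mem_some_iff] at hp'
        subst hp'
        exact fun e => absurd (e ▸ hS L' (by simp)) (lt_irrefl _)

-- running B's while loop through a fully fitting prefix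
theorem pv_span_concat (max_per_group : Int) :
    ∀ (l : List (Char × List (List (String × String)))) (t : Int)
      (rest : List (Char × List (List (String × String)))),
      t + ((l.flatMap (fun p => p.2)).length : Int) ≤ max_per_group →
      pvSpan max_per_group t (l ++ rest)
        = l.length + pvSpan max_per_group (t + ((l.flatMap (fun p => p.2)).length : Int)) rest := by
  intro l
  induction l with
  | nil => intro t rest _; simp
  | cons q l ih =>
    intro t rest h
    have hlen : ((((q :: l).flatMap (fun p => p.2)).length : Int))
        = (q.2.length : Int) + ((l.flatMap (fun p => p.2)).length : Int) := by
      simp [List.flatMap_cons]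
    rw [hlen] at h
    have hq : t + (q.2.length : Int) ≤ max_per_group := by
      have h0 : (0 : Int) ≤ ((l.flatMap (fun p => p.2)).length : Int) := by positivity
      omega
    simp only [List.cons_append, pvSpan, if_pos hq]
    rw [ih (t + (q.2.length : Int)) rest (by omega), hlen]
    have he : t + (q.2.length : Int) + ((l.flatMap (fun p => p.2)).length : Int)
        = t + ((q.2.length : Int) + ((l.flatMap (fun p => p.2)).length : Int)) := by ring
    rw [he]
    simp only [List.length_cons]
    omega

-- A's label of a chunk equals B's label computed from the chunk's endpoint pairs
theorem pv_label_chunk (p : Char × List (List (String × String)))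
    (l : List (Char × List (List (String × String)))) :
    pvLabelA ((p :: l).map (fun q => q.1))
      = (if (1 + l.length) == 1 then String.ofList [p.1]
         else String.ofList [p.1, '-', (((PySem.List.pyGet? (p :: l) (-1)).map (fun q => q.1)).getD ' ')]) := by
  cases l with
  | nil => simp [pvLabelA, PySem.List.pyGet?, PySem.List.pyIdx?]
  | cons q r =>
    have hA1 : PySem.List.pyGet? ((p :: q :: r).map (fun q => q.1)) 0 = some p.1 := by
      simp [PySem.List.pyGet?, PySem.List.pyIdx?,
        show (0 : Int) ≤ (r.length : Int) + 1 from by positivity]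
    have hA2 : PySem.List.pyGet? ((p :: q :: r).map (fun q => q.1)) (-1)
        = ((p :: q :: r).map (fun q => q.1)).getLast? := by
      simp [PySem.List.pyGet?, PySem.List.pyIdx?, List.getLast?_eq_getElem?]
    have hB2 : PySem.List.pyGet? (p :: q :: r) (-1) = (p :: q :: r).getLast? := by
      simp [PySem.List.pyGet?, PySem.List.pyIdx?, List.getLast?_eq_getElem?]
    have hlast : ((p :: q :: r).map (fun q => q.1)).getLast? = ((p :: q :: r).getLast?).map (fun q => q.1) :=
      List.getLast?_map
    rw [pvLabelA, if_neg (by simp), hA1, hA2, hB2, hlast, if_neg (by simp)]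
    rw [List.getLast?_eq_some_getLast (l := p :: q :: r) (by simp)]
    simp

-- the greedy fold, seeded with a pending run ps, computes exactly B's chunks of ps ++ gs
theorem pv_fold_chunks (max_per_group : Int) :
    ∀ (gs : List (Char × List (List (String × String))))
      (res : List (String × List (List (String × String))))
      (ps : List (Char × List (List (String × String)))),
      ps ≠ [] →
      (∀ p ∈ ps ++ gs, p.2 ≠ ([] : List (List (String × String)))) →
      (ps.length = 1 ∨ (((ps.flatMap (fun p => p.2)).length : Int)) ≤ max_per_group) →
      pvFinA (gs.foldl (pvStepP max_per_group) (res, ps.flatMap (fun p => p.2), ps.map (fun p => p.1)))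
        = res ++ pvChunks max_per_group (ps ++ gs) := by
  intro gs
  induction gs with
  | nil =>
    intro res ps hne hbk hinv
    rcases ps with _ | ⟨p, l⟩
    · exact absurd rfl hne
    have hcur : (p :: l).flatMap (fun p => p.2) ≠ [] := by
      have hp2 := hbk p (by simp)
      simp only [List.flatMap_cons, ne_eq, List.append_eq_nil_iff, not_and_or]
      exact Or.inl hp2
    have hspan : pvSpan max_per_group ((p.2.length : Int)) l = l.length := by
      rcases hinv with h1 | h1
      · have hl : l = [] := List.eq_nil_of_length_eq_zero (by simpa using h1)
        subst hl; rfl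
      · have h2 := pv_span_concat max_per_group l ((p.2.length : Int)) []
          (by simp only [List.flatMap_cons, List.length_append, Nat.cast_add] at h1; omega)
        simpa using h2
    simp only [List.append_nil, List.foldl_nil, pvFinA, List.isEmpty_iff, if_neg hcur]
    rw [show pvChunks max_per_group (p :: l) = _ from by rw [pvChunks]]
    simp only [hspan]
    have htake : (p :: l).take (1 + l.length) = p :: l :=
      List.take_of_length_le (by simp [Nat.add_comm])
    have hdrop : (p :: l).drop (1 + l.length) = [] :=
      List.drop_of_length_le (by simp [Nat.add_comm])
    rw [htake, hdrop, pv_label_chunk p l]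
    simp [pvChunks]
  | cons g gs ih =>
    intro res ps hne hbk hinv
    rcases ps with _ | ⟨p, l⟩
    · exact absurd rfl hne
    have hcur : (p :: l).flatMap (fun p => p.2) ≠ [] := by
      have hp2 := hbk p (by simp)
      simp only [List.flatMap_cons, ne_eq, List.append_eq_nil_iff, not_and_or]
      exact Or.inl hp2
    simp only [List.foldl_cons]
    by_cases hfit : ((((p :: l).flatMap (fun p => p.2)).length : Int)) + (g.2.length : Int) ≤ max_per_group
    · have hstep : pvStepP max_per_group (res, (p :: l).flatMap (fun p => p.2), (p :: l).map (fun p => p.1)) g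
          = (res, ((p :: l) ++ [g]).flatMap (fun p => p.2), ((p :: l) ++ [g]).map (fun p => p.1)) := by
        simp only [pvStepP, if_pos hfit]
        simp
      rw [hstep,
          ih res ((p :: l) ++ [g]) (by simp)
            (by intro q hq
                apply hbk
                rcases List.mem_append.mp hq with h | h
                · rcases List.mem_append.mp h with h | h
                  · exact List.mem_append.mpr (Or.inl h)
                  · exact List.mem_append.mpr (Or.inr (by simp [List.mem_singleton.mp h]))
                · exact List.mem_append.mpr (Or.inr (by simp [h])))
            (Or.inr (by simp only [List.flatMap_append, List.length_append, Nat.cast_add]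
                        simpa using hfit))]
      rw [List.append_assoc]
      rfl
    · have hstep : pvStepP max_per_group (res, (p :: l).flatMap (fun p => p.2), (p :: l).map (fun p => p.1)) g
          = (res ++ [(pvLabelA ((p :: l).map (fun p => p.1)), (p :: l).flatMap (fun p => p.2))], g.2, [g.1]) := by
        simp only [pvStepP, if_neg hfit, List.isEmpty_iff, if_neg hcur]
      have hseed : (g.2 : List (List (String × String))) = [g].flatMap (fun p => p.2) := by simp
      have hseed2 : ([g.1] : List Char) = [g].map (fun p => p.1) := by simp
      rw [hstep, hseed, hseed2,
          ih (res ++ [(pvLabelA ((p :: l).map (fun p => p.1)), (p :: l).flatMap (fun p => p.2))]) [g] (by simp)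
            (by intro q hq
                apply hbk
                rcases List.mem_append.mp hq with h | h
                · exact List.mem_append.mpr (Or.inr (by simp [List.mem_singleton.mp h]))
                · exact List.mem_append.mpr (Or.inr (by simp [h])))
            (Or.inl rfl)]
      -- the first chunk of (p :: l) ++ g :: gs is exactly p :: l
      have hspan : pvSpan max_per_group ((p.2.length : Int)) (l ++ g :: gs) = l.length := by
        rcases hinv with h1 | h1
        · have hl : l = [] := List.eq_nil_of_length_eq_zero (by simpa using h1)
          subst hl
          have hng : ¬ (p.2.length : Int) + (g.2.length : Int) ≤ max_per_group := by
            simpa [List.flatMap_cons] using hfit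
          simp only [List.nil_append, pvSpan, if_neg hng]
          rfl
        · have htot : ((p.2.length : Int)) + ((l.flatMap (fun p => p.2)).length : Int) ≤ max_per_group := by
            simp only [List.flatMap_cons, List.length_append, Nat.cast_add] at h1; omega
          rw [pv_span_concat max_per_group l ((p.2.length : Int)) (g :: gs) htot]
          have hstop : ¬ ((p.2.length : Int)) + ((l.flatMap (fun p => p.2)).length : Int)
              + (g.2.length : Int) ≤ max_per_group := by
            simp only [List.flatMap_cons, List.length_append, Nat.cast_add] at hfit
            omega
          simp only [pvSpan]
          rw [if_neg (by omega)]
          omega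
      conv_rhs => rw [show (p :: l) ++ g :: gs = p :: (l ++ g :: gs) from by simp]
      rw [show pvChunks max_per_group (p :: (l ++ g :: gs)) = _ from by rw [pvChunks]]
      simp only [hspan]
      have htake : (p :: (l ++ g :: gs)).take (1 + l.length) = p :: l := by
        rw [show (1 + l.length) = (p :: l).length from by simp [Nat.add_comm],
            show p :: (l ++ g :: gs) = (p :: l) ++ (g :: gs) from by simp,
            List.take_left]
      have hdrop : (p :: (l ++ g :: gs)).drop (1 + l.length) = g :: gs := by
        rw [show (1 + l.length) = (p :: l).length from by simp [Nat.add_comm],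
            show p :: (l ++ g :: gs) = (p :: l) ++ (g :: gs) from by simp,
            List.drop_left]
      rw [htake, hdrop, pv_label_chunk p l]
      simp

-- ===== VERDICT (by name: the statement is the Claim_ definition above) =====
theorem split_countries_alphabetically_spec : Claim_equal_split_countries_alphabetically := by
  intro countries max_per_group _ _
  unfold Spec_split_countries_alphabetically
  unfold split_countries_alphabetically split_countries_alphabetically_alt
  by_cases hlen : (countries.length : Int) ≤ max_per_group
  · rw [if_pos hlen, if_pos hlen]
  · rw [if_neg hlen, if_neg hlen]
    have hkeys := pv_keys_lg countries
    have hstep : (countries.foldl (fun d c => d.modify (pvLetter c) [] (· ++ [c]))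
          PySem.Dict.empty) |> fun lg => pvStepA lg max_per_group
            = fun st L => pvStepP max_per_group st (L, pvBk countries L) := by
      funext st letter
      unfold pvStepA pvStepP
      rw [pv_getD_lg]
    simp only at hstep
    simp only [hkeys, hstep]
    have hS := PySem.List.sorted_ofList_pairwise_lt (countries.map pvLetter)
    have hmemS : ∀ L, L ∈ PySem.List.sorted (PySem.Set.ofList (countries.map pvLetter)) (fun x => x) false
        ↔ L ∈ countries.map pvLetter := by
      intro L
      rw [PySem.List.mem_sorted, PySem.Set.mem_ofList]
    have hne : ∀ L ∈ PySem.List.sorted (PySem.Set.ofList (countries.map pvLetter)) (fun x => x) false,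
        pvBk countries L ≠ [] := by
      intro L hL
      rcases List.mem_map.mp ((hmemS L).mp hL) with ⟨c, hc, rfl⟩
      intro hnil
      have hmm : c ∈ pvBk countries (pvLetter c) := by
        simp [pvBk, List.mem_filter, hc]
      rw [hnil] at hmm
      exact absurd hmm (List.not_mem_nil)
    rw [pv_sorted_key_flatMap pvLetter countries,
        show (fun L => countries.filter (fun c => pvLetter c == L)) = pvBk countries from rfl,
        pv_groupby_flatMap pvLetter _ (pvBk countries) hS ?hk hne]
    case hk =>
      intro L _ a ha
      exact eq_of_beq (List.mem_filter.mp ha).2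
    -- fold over letters = fold over (letter, bucket) pairs
    rw [show (PySem.List.sorted (PySem.Set.ofList (countries.map pvLetter)) (fun x => x) false).foldl
          (fun st L => pvStepP max_per_group st (L, pvBk countries L)) ([], [], [])
        = ((PySem.List.sorted (PySem.Set.ofList (countries.map pvLetter)) (fun x => x) false).map
            (fun L => (L, pvBk countries L))).foldl (pvStepP max_per_group) ([], [], [])
        from (List.foldl_map).symm]
    have hgsne : ∀ p ∈ (PySem.List.sorted (PySem.Set.ofList (countries.map pvLetter)) (fun x => x) false).map
        (fun L => (L, pvBk countries L)), p.2 ≠ ([] : List (List (String × String))) := by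
      intro p hp
      rcases List.mem_map.mp hp with ⟨L, hL, rfl⟩
      exact hne L hL
    rcases hgsc : (PySem.List.sorted (PySem.Set.ofList (countries.map pvLetter)) (fun x => x) false).map
        (fun L => (L, pvBk countries L)) with _ | ⟨g, gs'⟩
    · simp [pvFinA, pvChunks]
    · rw [hgsc] at hgsne
      have hfirst : pvStepP max_per_group ([], [], []) g = ([], g.2, [g.1]) := by
        unfold pvStepP
        split <;> simp
      simp only [List.foldl_cons, hfirst]
      have hmain := pv_fold_chunks max_per_group gs' [] [g] (by simp)
        (by intro q hq; exact hgsne q (by simpa using hq)) (Or.inl rfl)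
      simpa using hmain
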